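-- pv_equiv track=rewrite | github.com/PacificBiosciences/FALCON | falcon_kit/util/io.py | splitlines_iter
-- ===== SOURCE A (Python) =====
-- def splitlines_iter(text):
--     """This is the same as splitlines, but with a generator.
--     """
--     # https://stackoverflow.com/questions/3054604/iterate-over-the-lines-of-a-string
--     prevnl = -1
--     while True:
--         nextnl = text.find('\n', prevnl + 1)
--         if nextnl < 0:
--             break
--         yield text[prevnl + 1:nextnl]
--         prevnl = nextnl
--     if (prevnl + 1) != len(text):
--         yield text[prevnl + 1:]
-- ===== SOURCE B (Python) =====
-- def splitlines_iter(text):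
--     """This is the same as splitlines, but with a generator.
--     """
--     parts = text.split('\n')
--     if parts and parts[-1] == '':
--         parts.pop()
--     yield from parts
-- ===== Notes on version B (the rewrite author's own statement) =====
-- stated objective: idiomatic
-- what changed: B replaces A's incremental find('\n', prev+1) scanning loop with one str.split('\n') pass, popping the single trailing empty piece to reproduce A's tail rule, then yielding the pre-split parts.
import Mathlib
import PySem

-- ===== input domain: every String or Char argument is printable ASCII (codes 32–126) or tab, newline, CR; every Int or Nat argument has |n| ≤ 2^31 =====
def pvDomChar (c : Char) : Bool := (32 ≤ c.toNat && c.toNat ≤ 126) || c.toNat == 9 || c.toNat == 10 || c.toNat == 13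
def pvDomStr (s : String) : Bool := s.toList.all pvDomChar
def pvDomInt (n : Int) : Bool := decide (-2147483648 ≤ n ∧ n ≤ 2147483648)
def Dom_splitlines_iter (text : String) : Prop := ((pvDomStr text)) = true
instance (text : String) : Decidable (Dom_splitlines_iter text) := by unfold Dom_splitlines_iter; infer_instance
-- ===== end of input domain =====

-- B computes text.split('\n') in one pass and drops a single trailing empty piece,
-- instead of A's incremental find-based scanning loop; idiomatic, same return value.


-- ===== PORT A =====
-- A's while-loop: each iteration finds the next '\n' from position prevnl+1, yields the
-- slice between, and advances prevnl.  The loop state is the suffix of text after prevnl;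
-- find/take/drop on that suffix compute the same values A's absolute-index find and slices do.
def splitlinesIterLoop (rest : List Char) : List String :=
  let nextnl := PySem.Chars.find rest ['\n']
  if h : nextnl < 0 then
    -- break; then: if (prevnl + 1) != len(text): yield text[prevnl + 1:]
    if rest.isEmpty then [] else [String.ofList rest]
  else
    String.ofList (rest.take nextnl.toNat) :: splitlinesIterLoop (rest.drop (nextnl.toNat + 1))
termination_by rest.length
decreasing_by
  rcases rest with _ | ⟨c, t⟩
  · exact absurd h (by decide)
  · simp only [List.length_drop, List.length_cons]; omega

def splitlines_iter (text : String) : List String :=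
  splitlinesIterLoop text.toList

-- ===== PORT B =====
-- parts = text.split('\n'); if parts and parts[-1] == '': parts.pop(); yield from parts
def splitlines_iter_alt (text : String) : List String :=
  let parts := PySem.Chars.splitOn text.toList ['\n']
  let parts := if parts ≠ [] ∧ parts.getLast? = some [] then parts.dropLast else parts
  parts.map String.ofList

-- ===== PRECONDITION & SPEC =====
def Spec_splitlines_iter (text : String) (out : List String) : Prop := out = splitlines_iter_alt text
instance (text : String) (out : List String) : Decidable (Spec_splitlines_iter text out) := by unfold Spec_splitlines_iter; infer_instance

-- ===== CLAIM (what is proved, stated in full; the proofs are below) =====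
def Claim_equal_splitlines_iter : Prop := ∀ (text : String), Dom_splitlines_iter text → Spec_splitlines_iter text (splitlines_iter text)

-- ===== LEMMAS AND PROOFS =====

/-- Structural single-char split: the shape `splitOn` has for a one-character separator. -/
def splitCh (sep : Char) : List Char → List (List Char)
  | [] => [[]]
  | c :: rest =>
    if c = sep then [] :: splitCh sep rest
    else match splitCh sep rest with
      | [] => [[c]]
      | p :: ps => (c :: p) :: ps

def consFirst (x : List Char) : List (List Char) → List (List Char)
  | [] => [x]
  | p :: ps => (x ++ p) :: ps

lemma splitCh_ne_nil (sep : Char) (l : List Char) : splitCh sep l ≠ [] := by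
  cases l with
  | nil => simp [splitCh]
  | cons c rest =>
    simp only [splitCh]
    split_ifs
    · simp
    · cases h : splitCh sep rest <;> simp

lemma consFirst_nil (ps : List (List Char)) (h : ps ≠ []) : consFirst [] ps = ps := by
  cases ps with
  | nil => exact absurd rfl h
  | cons p ps => simp [consFirst]

lemma consFirst_consFirst (x y : List Char) (ps : List (List Char)) :
    consFirst x (consFirst y ps) = consFirst (x ++ y) ps := by
  cases ps <;> simp [consFirst]

lemma splitCh_cons (sep c : Char) (rest : List Char) :
    splitCh sep (c :: rest) =
      if c = sep then [] :: splitCh sep rest else consFirst [c] (splitCh sep rest) := by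
  simp only [splitCh]
  split_ifs with h
  · rfl
  · cases hr : splitCh sep rest <;> simp [consFirst]

lemma splitOn_go_spec (sep : Char) (fuel : Nat) :
    ∀ (l cur : List Char) (acc : List (List Char)), l.length ≤ fuel →
      PySem.Chars.splitOn.go [sep] fuel l cur acc =
        acc.reverse ++ consFirst cur.reverse (splitCh sep l) := by
  induction fuel with
  | zero =>
    intro l cur acc hl
    have : l = [] := List.length_eq_zero_iff.mp (Nat.le_zero.mp hl)
    subst this
    simp [PySem.Chars.splitOn.go, splitCh, consFirst]
  | succ fuel ih =>
    intro l cur acc hl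
    cases l with
    | nil => simp [PySem.Chars.splitOn.go, splitCh, consFirst]
    | cons c rest =>
      have hpre : [sep].isPrefixOf (c :: rest) = (sep == c) := by
        simp [List.isPrefixOf]
      by_cases hc : c = sep
      · subst hc
        simp only [PySem.Chars.splitOn.go, hpre, BEq.rfl, if_true,
          List.length_cons, List.length_nil, List.drop_succ_cons, List.drop_zero]
        rw [ih rest [] (cur.reverse :: acc) (by simpa using Nat.lt_succ_iff.mp (by simpa using hl)),
            splitCh_cons]
        rw [if_pos rfl]
        simp only [consFirst, List.reverse_cons, List.reverse_nil, List.nil_append,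
          List.append_assoc, List.cons_append]
        cases hr : splitCh c rest with
        | nil => exact absurd hr (splitCh_ne_nil c rest)
        | cons p ps => simp
      · have hb : (sep == c) = false := by simp [Ne.symm hc]
        simp only [PySem.Chars.splitOn.go, hpre, hb]
        rw [ih rest (c :: cur) acc (by simpa using Nat.lt_succ_iff.mp (by simpa using hl)),
            splitCh_cons]
        simp only [if_neg hc]
        rw [consFirst_consFirst]
        simp [consFirst]

lemma splitOn_single (sep : Char) (l : List Char) :
    PySem.Chars.splitOn l [sep] = splitCh sep l := by
  unfold PySem.Chars.splitOn
  rw [splitOn_go_spec sep (l.length + 1) l [] [] (by omega)]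
  simp [consFirst_nil _ (splitCh_ne_nil sep l)]

lemma splitCh_of_not_mem (sep : Char) (l : List Char) (h : sep ∉ l) :
    splitCh sep l = [l] := by
  induction l with
  | nil => rfl
  | cons c rest ih =>
    rw [splitCh_cons]
    rw [if_neg (by rintro rfl; exact h (List.mem_cons_self))]
    rw [ih (fun hm => h (List.mem_cons_of_mem _ hm))]
    simp [consFirst]

lemma splitCh_append (sep : Char) (a b : List Char) (ha : sep ∉ a) :
    splitCh sep (a ++ sep :: b) = a :: splitCh sep b := by
  induction a with
  | nil => rw [List.nil_append, splitCh_cons, if_pos rfl]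
  | cons c t ih =>
    rw [List.cons_append, splitCh_cons,
        if_neg (by rintro rfl; exact ha List.mem_cons_self),
        ih (fun hm => ha (List.mem_cons_of_mem _ hm))]
    simp [consFirst]

/-- The trailing-empty drop, on char-list pieces. -/
def dropTrail (ps : List (List Char)) : List (List Char) :=
  if ps.getLast? = some [] then ps.dropLast else ps

lemma dropTrail_cons (a : List Char) (ps : List (List Char)) (h : ps ≠ []) :
    dropTrail (a :: ps) = a :: dropTrail ps := by
  cases ps with
  | nil => exact absurd rfl h
  | cons q qs =>
    unfold dropTrail
    rw [List.getLast?_cons_cons]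
    split_ifs <;> rfl

lemma loop_eq_dropTrail (rest : List Char) :
    splitlinesIterLoop rest = (dropTrail (splitCh '\n' rest)).map String.ofList := by
  rw [splitlinesIterLoop]
  by_cases h : PySem.Chars.find rest ['\n'] < 0
  · rw [dif_pos h]
    have hne : PySem.Chars.find rest ['\n'] = -1 := by
      have := PySem.Chars.neg_one_le_find rest ['\n']; omega
    have hinf : ¬ ['\n'] <:+: rest := (PySem.Chars.find_eq_neg_one_iff _ _).mp hne
    have hmem : '\n' ∉ rest := fun hm => hinf ((List.singleton_infix_iff _ _).mpr hm)
    rw [splitCh_of_not_mem _ _ hmem]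
    cases rest with
    | nil => simp [dropTrail]
    | cons c t => simp [dropTrail, List.getLast?_singleton]
  · rw [dif_neg h]
    have h0 : 0 ≤ PySem.Chars.find rest ['\n'] := by omega
    set n := (PySem.Chars.find rest ['\n']).toNat with hn
    obtain ⟨hpre, hmin⟩ := PySem.Chars.find_spec (s := rest) (sub := ['\n']) h0
    have hlen : n < rest.length := by
      by_contra hge
      have : rest.drop n = [] := List.drop_eq_nil_of_le (by omega)
      rw [this] at hpre
      exact absurd (List.prefix_nil.mp hpre) (by simp)
    -- rest = take n ++ '\n' :: drop (n+1)
    have hdropn : rest.drop n = '\n' :: rest.drop (n + 1) := by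
      obtain ⟨t, ht⟩ := hpre
      have h1 : rest.drop n = '\n' :: t := by rw [← ht]; rfl
      have h2 : rest.drop (n + 1) = t := by
        have h3 := congrArg (List.drop 1) h1
        rw [List.drop_drop] at h3
        simpa [Nat.add_comm] using h3
      rw [h1, h2]
    have hsplit : rest = rest.take n ++ '\n' :: rest.drop (n + 1) := by
      conv_lhs => rw [← List.take_append_drop n rest]
      rw [hdropn]
    have hnot : '\n' ∉ rest.take n := by
      intro hm
      obtain ⟨i, hi, hgi⟩ := List.getElem_of_mem hm
      have hilt : i < n := by have h' := hi; simp [List.length_take] at h'; omega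
      apply hmin i hilt
      have : rest.drop i = '\n' :: rest.drop (i + 1) := by
        have : rest[i] = '\n' := by
          have := List.getElem_take (xs := rest) (i := i) (h := hi)
          rw [this] at hgi; exact hgi
        rw [List.drop_eq_getElem_cons (by omega), this]
      rw [this]
      exact ⟨_, rfl⟩
    calc String.ofList (rest.take n) :: splitlinesIterLoop (rest.drop (n + 1))
        = String.ofList (rest.take n) :: (dropTrail (splitCh '\n' (rest.drop (n + 1)))).map String.ofList :=
          by rw [loop_eq_dropTrail (rest.drop (n + 1))]
      _ = (dropTrail (splitCh '\n' rest)).map String.ofList := by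
          conv_rhs => rw [hsplit]
          rw [splitCh_append _ _ _ hnot, dropTrail_cons _ _ (splitCh_ne_nil _ _)]
          simp
termination_by rest.length
decreasing_by
  simp only [List.length_drop]
  omega

-- ===== VERDICT (by name: the statement is the Claim_ definition above) =====
theorem splitlines_iter_spec : Claim_equal_splitlines_iter := by
  intro text _
  unfold Spec_splitlines_iter splitlines_iter splitlines_iter_alt
  rw [loop_eq_dropTrail, splitOn_single]
  unfold dropTrail
  have hne := splitCh_ne_nil '\n' text.toList
  by_cases hl : (splitCh '\n' text.toList).getLast? = some []
  · simp [hl, hne]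
  · simp [hl]
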